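-- pv_equiv track=rewrite | github.com/every-algorithm/python | graph/gyo_algorithm.py | gyo_acyclicity
-- ===== SOURCE A (Python) =====
-- def gyo_acyclicity(hyperedges):
--     # hyperedges: list of iterables representing sets of vertices
--     h = [set(e) for e in hyperedges]
--     while h:
--         removed = False
--         # Subset reduction
--         for e1 in h:
--             for e2 in h:
--                 if e1 is e2:
--                     continue
--                 if e1 >= e2:
--                     h.remove(e1)
--                     removed = True
--                     break
--             if removed:
--                 break
--         if removed:
--             continue
--         # Vertex degree reduction
--         deg = {}
--         for e in h:
--             for v in e:
--                 deg[v] = deg.get(v, 0) + 1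
--         for e in h:
--             if all(deg[v] == 1 for v in e):
--                 h.remove(e)
--                 removed = True
--                 break
--         if not removed:
--             break
--     return len(h) == 0
-- ===== SOURCE B (Python) =====
-- def gyo_acyclicity(hyperedges):
--     # Same GYO reduction order as the original, but decided from a containment
--     # matrix and a disjointness matrix precomputed once over the original edges
--     # (the "all vertex degrees are 1" ear test becomes "disjoint from every other
--     # alive edge"), with a worklist of alive indices instead of rescanning sets
--     # and rebuilding a degree dict each round.
--     sets = [set(e) for e in hyperedges]
--     n = len(sets)
--     sup = [[sets[i] >= sets[j] for j in range(n)] for i in range(n)]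
--     dis = [[sets[i].isdisjoint(sets[j]) for j in range(n)] for i in range(n)]
--     alive = list(range(n))
--     while alive:
--         pick = next((i for i in alive
--                      if any(j != i and sup[i][j] for j in alive)), None)
--         if pick is None:
--             # an edge all of whose vertices lie in no other alive edge
--             pick = next((i for i in alive
--                          if all(j == i or dis[i][j] for j in alive)), None)
--         if pick is None:
--             return False
--         alive.remove(pick)
--     return True
-- ===== Notes on version B (the rewrite author's own statement) =====
-- stated objective: alternative
-- what changed: Instead of rescanning all edge pairs with set-containment tests and rebuilding a degree dict every round, B precomputes a containment matrix and a disjointness matrix once over the original edges (the ear test 'all vertex degrees 1' is reformulated as 'disjoint from every other alive edge') and runs the same elimination order over a worklist of alive indices.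
import Mathlib
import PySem

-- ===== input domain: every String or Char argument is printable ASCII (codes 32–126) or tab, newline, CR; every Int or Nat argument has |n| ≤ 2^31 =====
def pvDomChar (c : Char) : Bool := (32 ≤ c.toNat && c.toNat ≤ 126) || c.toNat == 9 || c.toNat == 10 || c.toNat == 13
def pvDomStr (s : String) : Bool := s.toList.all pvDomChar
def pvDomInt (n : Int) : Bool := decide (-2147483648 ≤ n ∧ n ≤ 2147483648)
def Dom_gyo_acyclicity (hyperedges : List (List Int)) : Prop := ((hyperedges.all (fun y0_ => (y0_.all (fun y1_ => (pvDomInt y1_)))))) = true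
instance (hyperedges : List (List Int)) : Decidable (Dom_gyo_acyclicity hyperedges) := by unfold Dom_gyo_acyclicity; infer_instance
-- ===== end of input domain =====

-- B runs the same GYO elimination order as A, but decides each removal from a
-- containment matrix and a disjointness matrix precomputed once over the original
-- edges, keeping a list of alive indices instead of rescanning sets and rebuilding
-- a degree dict every round (objective: alternative).

-- ===== PORT A =====
-- Python sets are PySem.Set Int; `e1 >= e2` is Set.issuperset
def gyoSup (a b : List Int) : Bool := PySem.Set.issuperset a b

-- `for e2 in h: if e1 is e2: continue; if e1 >= e2: …` — `is` identity is the
-- position in h (each element of h is a fresh set object), so the scan carries i, j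
def gyoInner (l : List (List Int)) (i : Nat) (e1 : List Int) (j : Nat) : Bool :=
  match l with
  | [] => false
  | e2 :: t =>
    if j = i then gyoInner t i e1 (j + 1)
    else if gyoSup e1 e2 then true
    else gyoInner t i e1 (j + 1)

-- `for e1 in h` with the inner scan; returns the e1 that triggered removal
def gyoOuter (full : List (List Int)) (t : List (List Int)) (i : Nat) : Option (List Int) :=
  match t with
  | [] => none
  | e1 :: t' => if gyoInner full i e1 0 then some e1 else gyoOuter full t' (i + 1)

-- h.remove(e1): Python list.remove drops the FIRST element == e1; == on sets is Set.equal
def gyoRemove (h : List (List Int)) (e : List Int) : List (List Int) :=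
  match h with
  | [] => []
  | x :: t => if PySem.Set.equal x e then t else x :: gyoRemove t e

-- deg = {}; for e in h: for v in e: deg[v] = deg.get(v, 0) + 1
def gyoDeg (h : List (List Int)) : PySem.Dict Int Int :=
  h.foldl (fun d e => e.foldl (fun d v => d.modify v 0 (· + 1)) d) PySem.Dict.empty

-- deg[v]: every v ∈ e ∈ h was counted, so the lookup never raises; getD is exact here
def gyoDegScan (d : PySem.Dict Int Int) (t : List (List Int)) : Option (List Int) :=
  match t with
  | [] => none
  | e :: t' => if e.all (fun v => d.getD v 0 == 1) then some e else gyoDegScan d t'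

-- termination facts for the while loop (cited by decreasing_by)
lemma gyoRemove_lt (h : List (List Int)) (e : List Int) (he : e ∈ h) :
    (gyoRemove h e).length < h.length := by
  induction h with
  | nil => cases he
  | cons x t ih =>
    by_cases hx : PySem.Set.equal x e = true
    · simp [gyoRemove, hx]
    · rcases List.mem_cons.mp he with rfl | hmem
      · exact absurd ((PySem.Set.equal_iff e e).mpr (fun _ => Iff.rfl)) hx
      · simp only [gyoRemove, if_neg hx, List.length_cons]
        exact Nat.succ_lt_succ (ih hmem)

lemma gyoOuter_mem (full : List (List Int)) :
    ∀ (t : List (List Int)) (i : Nat) (e : List Int), gyoOuter full t i = some e → e ∈ t := by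
  intro t
  induction t with
  | nil => intro i e h; simp [gyoOuter] at h
  | cons a t' ih =>
    intro i e h
    simp only [gyoOuter] at h
    split at h
    · exact (Option.some.inj h) ▸ List.mem_cons_self
    · exact List.mem_cons_of_mem _ (ih (i + 1) e h)

lemma gyoDegScan_mem (d : PySem.Dict Int Int) :
    ∀ (t : List (List Int)) (e : List Int), gyoDegScan d t = some e → e ∈ t := by
  intro t
  induction t with
  | nil => intro e h; simp [gyoDegScan] at h
  | cons a t' ih =>
    intro e h
    simp only [gyoDegScan] at h
    split at h
    · exact (Option.some.inj h) ▸ List.mem_cons_self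
    · exact List.mem_cons_of_mem _ (ih e h)

-- while h: … (one removal per round, else break)
def gyoLoop (h : List (List Int)) : Bool :=
  if h.isEmpty then true
  else
    match hs : gyoOuter h h 0 with
    | some e1 => gyoLoop (gyoRemove h e1)
    | none =>
      match hd : gyoDegScan (gyoDeg h) h with
      | some e => gyoLoop (gyoRemove h e)
      | none => false
termination_by h.length
decreasing_by
  · exact gyoRemove_lt _ _ (gyoOuter_mem _ _ _ _ hs)
  · exact gyoRemove_lt _ _ (gyoDegScan_mem _ _ _ hd)

def gyo_acyclicity (hyperedges : List (List Int)) : Bool :=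
  gyoLoop (hyperedges.map PySem.Set.ofList)

-- ===== PORT B =====
-- matrix lookup sup[i][j] (indices are always in range at the call sites)
def gyoLook (m : List (List Bool)) (i j : Nat) : Bool := (m.getD i []).getD j false

def gyoSupMat (sets : List (List Int)) : List (List Bool) :=
  (List.range sets.length).map (fun i => (List.range sets.length).map
    (fun j => PySem.Set.issuperset (sets.getD i []) (sets.getD j [])))

def gyoDisMat (sets : List (List Int)) : List (List Bool) :=
  (List.range sets.length).map (fun i => (List.range sets.length).map
    (fun j => PySem.Set.isdisjoint (sets.getD i []) (sets.getD j [])))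

-- any(j != i and sup[i][j] for j in alive)
def gyoAnySup (sup : List (List Bool)) (alive : List Nat) (i : Nat) : Bool :=
  alive.any (fun j => decide (j ≠ i) && gyoLook sup i j)

-- all(j == i or dis[i][j] for j in alive)
def gyoAllDis (dis : List (List Bool)) (alive : List Nat) (i : Nat) : Bool :=
  alive.all (fun j => decide (j = i) || gyoLook dis i j)

-- the two next(…, None) calls
def gyoPick (sup dis : List (List Bool)) (alive : List Nat) : Option Nat :=
  match alive.find? (gyoAnySup sup alive) with
  | some i => some i
  | none => alive.find? (gyoAllDis dis alive)

lemma gyoPick_mem (sup dis : List (List Bool)) (alive : List Nat) (i : Nat)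
    (h : gyoPick sup dis alive = some i) : i ∈ alive := by
  unfold gyoPick at h
  split at h
  · next heq => exact List.mem_of_find?_eq_some (h ▸ heq)
  · exact List.mem_of_find?_eq_some h

-- while alive: …; alive.remove(pick) (indices are distinct, so remove = erase)
def gyoLoopB (sup dis : List (List Bool)) (alive : List Nat) : Bool :=
  if alive.isEmpty then true
  else
    match hp : gyoPick sup dis alive with
    | some i => gyoLoopB sup dis (alive.erase i)
    | none => false
termination_by alive.length
decreasing_by
  have hm := gyoPick_mem sup dis alive i hp
  have := List.length_erase_of_mem hm
  have : 0 < alive.length := List.length_pos_of_mem hm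
  omega

def gyo_acyclicity_alt (hyperedges : List (List Int)) : Bool :=
  let sets := hyperedges.map PySem.Set.ofList
  gyoLoopB (gyoSupMat sets) (gyoDisMat sets) (List.range sets.length)

-- ===== PRECONDITION & SPEC =====
def Spec_gyo_acyclicity (hyperedges : List (List Int)) (out : Bool) : Prop := out = gyo_acyclicity_alt hyperedges
instance (hyperedges : List (List Int)) (out : Bool) : Decidable (Spec_gyo_acyclicity hyperedges out) := by unfold Spec_gyo_acyclicity; infer_instance

-- ===== CLAIM (what is proved, stated in full; the proofs are below) =====
def Claim_equal_gyo_acyclicity : Prop := ∀ (hyperedges : List (List Int)), Dom_gyo_acyclicity hyperedges → Spec_gyo_acyclicity hyperedges (gyo_acyclicity hyperedges)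

-- ===== LEMMAS AND PROOFS =====
-- the i-th original edge (sets.getD i [] = sets[i] at all indices we use)
def gyoG (sets : List (List Int)) (i : Nat) : List Int := sets.getD i []

lemma gyoG_nodup (sets : List (List Int)) (hset : ∀ e ∈ sets, e.Nodup) (a : Nat) :
    (gyoG sets a).Nodup := by
  unfold gyoG
  by_cases ha : a < sets.length
  · rw [List.getD_eq_getElem sets [] ha]; exact hset _ (List.getElem_mem ha)
  · rw [List.getD_eq_default sets [] (by omega)]; exact List.nodup_nil

lemma gyoLook_sup (sets : List (List Int)) {i j : Nat}
    (hi : i < sets.length) (hj : j < sets.length) :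
    gyoLook (gyoSupMat sets) i j = PySem.Set.issuperset (gyoG sets i) (gyoG sets j) := by
  unfold gyoLook gyoSupMat gyoG
  rw [PySem.List.getD_map_range _ _ _ _ hi, PySem.List.getD_map_range _ _ _ _ hj]

lemma gyoLook_dis (sets : List (List Int)) {i j : Nat}
    (hi : i < sets.length) (hj : j < sets.length) :
    gyoLook (gyoDisMat sets) i j = PySem.Set.isdisjoint (gyoG sets i) (gyoG sets j) := by
  unfold gyoLook gyoDisMat gyoG
  rw [PySem.List.getD_map_range _ _ _ _ hi, PySem.List.getD_map_range _ _ _ _ hj]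

lemma gyoInner_iff (i : Nat) (e1 : List Int) :
    ∀ (l : List (List Int)) (j : Nat),
      gyoInner l i e1 j = true ↔ ∃ m, ∃ _ : m < l.length, j + m ≠ i ∧ gyoSup e1 l[m] = true := by
  intro l
  induction l with
  | nil => intro j; simp [gyoInner]
  | cons e2 t ih =>
    intro j
    simp only [gyoInner]
    constructor
    · intro h
      split at h
      · rcases (ih (j+1)).mp h with ⟨m, hm, hne, hsup⟩
        exact ⟨m + 1, by simpa using hm, by omega, by simpa using hsup⟩
      · next hji =>
        split at h
        · next hs => exact ⟨0, by simp, by omega, by simpa using hs⟩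
        · rcases (ih (j+1)).mp h with ⟨m, hm, hne, hsup⟩
          exact ⟨m + 1, by simpa using hm, by omega, by simpa using hsup⟩
    · rintro ⟨m, hm, hne, hsup⟩
      by_cases hji : j = i
      · rw [if_pos hji]
        apply (ih (j+1)).mpr
        match m with
        | 0 => omega
        | m + 1 => exact ⟨m, by simpa using hm, by omega, by simpa using hsup⟩
      · rw [if_neg hji]
        match m with
        | 0 =>
          simp only [List.getElem_cons_zero] at hsup
          rw [if_pos hsup]
        | m + 1 =>
          split
          · rfl
          · exact (ih (j+1)).mpr ⟨m, by simpa using hm, by omega, by simpa using hsup⟩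


lemma gyoAnySup_iff (sets : List (List Int)) (alive : List Nat)
    (hb : ∀ a ∈ alive, a < sets.length) (i : Nat) (hi : i < sets.length) :
    gyoAnySup (gyoSupMat sets) alive i = true ↔
      ∃ b ∈ alive, b ≠ i ∧ PySem.Set.issuperset (gyoG sets i) (gyoG sets b) = true := by
  unfold gyoAnySup
  rw [List.any_eq_true]
  constructor
  · rintro ⟨b, hbm, hcond⟩
    rw [Bool.and_eq_true, decide_eq_true_eq] at hcond
    exact ⟨b, hbm, hcond.1, by rw [← gyoLook_sup sets hi (hb b hbm)]; exact hcond.2⟩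
  · rintro ⟨b, hbm, hne, hsup⟩
    exact ⟨b, hbm, by
      rw [Bool.and_eq_true, decide_eq_true_eq]
      exact ⟨hne, by rw [gyoLook_sup sets hi (hb b hbm)]; exact hsup⟩⟩

lemma gyoAllDis_iff (sets : List (List Int)) (alive : List Nat)
    (hb : ∀ a ∈ alive, a < sets.length) (i : Nat) (hi : i < sets.length) :
    gyoAllDis (gyoDisMat sets) alive i = true ↔
      ∀ b ∈ alive, b = i ∨ PySem.Set.isdisjoint (gyoG sets i) (gyoG sets b) = true := by
  unfold gyoAllDis
  rw [List.all_eq_true]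
  constructor
  · intro h b hbm
    have := h b hbm
    rw [Bool.or_eq_true, decide_eq_true_eq] at this
    rcases this with h1 | h2
    · exact Or.inl h1
    · exact Or.inr (by rw [← gyoLook_dis sets hi (hb b hbm)]; exact h2)
  · intro h b hbm
    rw [Bool.or_eq_true, decide_eq_true_eq]
    rcases h b hbm with h1 | h2
    · exact Or.inl h1
    · exact Or.inr (by rw [gyoLook_dis sets hi (hb b hbm)]; exact h2)

-- the subset predicates of the two programs agree position by position
lemma gyoPredSup (sets : List (List Int)) (alive : List Nat) (hnd : alive.Nodup)
    (hb : ∀ a ∈ alive, a < sets.length) (k : Nat) (hk : k < alive.length) :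
    gyoInner (alive.map (gyoG sets)) k (gyoG sets alive[k]) 0
      = gyoAnySup (gyoSupMat sets) alive alive[k] := by
  have hklt : alive[k] < sets.length := hb _ (List.getElem_mem hk)
  rw [Bool.eq_iff_iff, gyoInner_iff, gyoAnySup_iff sets alive hb _ hklt]
  constructor
  · rintro ⟨m, hm, hne, hsup⟩
    rw [List.length_map] at hm
    rw [List.getElem_map] at hsup
    refine ⟨alive[m], List.getElem_mem hm, ?_, hsup⟩
    intro heq
    exact hne (by simpa using (hnd.getElem_inj_iff.mp heq))
  · rintro ⟨b, hbm, hne, hsup⟩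
    rcases List.mem_iff_getElem.mp hbm with ⟨m, hm, rfl⟩
    refine ⟨m, by simpa using hm, ?_, by rw [List.getElem_map]; exact hsup⟩
    intro heq
    have hmk : m = k := by omega
    subst hmk
    exact hne rfl

lemma gyoDeg_aux (v : Int) :
    ∀ (h : List (List Int)) (d : PySem.Dict Int Int),
      (h.foldl (fun d e => e.foldl (fun d v => d.modify v 0 (· + 1)) d) d).getD v 0
        = d.getD v 0 + ((h.map (fun e => (e.count v : Int))).sum) := by
  intro h
  induction h with
  | nil => intro d; simp
  | cons e t ih =>
    intro d
    simp only [List.foldl_cons, List.map_cons, List.sum_cons]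
    rw [ih, PySem.Dict.getD_foldl_modify_add_one]
    ring

-- deg[v] after the counting loop is the number of alive edges containing v
lemma gyoDeg_getD (h : List (List Int)) (hnd : ∀ e ∈ h, e.Nodup) (v : Int) :
    (gyoDeg h).getD v 0 = (h.countP (fun e => decide (v ∈ e)) : Int) := by
  unfold gyoDeg
  rw [gyoDeg_aux]
  simp only [PySem.Dict.getD_empty, zero_add]
  induction h with
  | nil => simp
  | cons e t ih =>
    simp only [List.map_cons, List.sum_cons, List.countP_cons]
    rw [ih (fun x hx => hnd x (List.mem_cons_of_mem _ hx))]
    by_cases hv : v ∈ e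
    · rw [List.count_eq_one_of_mem (hnd e List.mem_cons_self) hv]
      simp [hv]
      ring
    · rw [List.count_eq_zero_of_not_mem hv]
      simp [hv]

lemma countP_one_iff {α : Type} (p : α → Bool) :
    ∀ (l : List α) (k : Nat) (hk : k < l.length), p l[k] = true →
      (l.countP p = 1 ↔ ∀ m, (_ : m < l.length) → m ≠ k → p l[m] = false) := by
  intro l
  induction l with
  | nil => intro k hk; simp at hk
  | cons a t ih =>
    intro k hk hp
    match k with
    | 0 =>
      simp only [List.getElem_cons_zero] at hp
      rw [List.countP_cons, hp]
      simp only [if_true]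
      constructor
      · intro h
        have h0 : t.countP p = 0 := by omega
        intro m hm hmk
        match m with
        | m + 1 =>
          simp only [List.length_cons] at hm
          have hmt : m < t.length := by omega
          have hf := List.countP_eq_zero.mp h0 t[m] (List.getElem_mem hmt)
          simp only [List.getElem_cons_succ]
          exact Bool.eq_false_iff.mpr hf
      · intro h
        have h0 : t.countP p = 0 := List.countP_eq_zero.mpr (by
          intro x hx
          rcases List.mem_iff_getElem.mp hx with ⟨m, hm, rfl⟩
          have hh := h (m + 1) (by simp only [List.length_cons]; omega) (by omega)
          simp only [List.getElem_cons_succ] at hh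
          simp [hh])
        omega
    | k + 1 =>
      simp only [List.getElem_cons_succ] at hp
      rw [List.countP_cons]
      simp only [List.length_cons] at hk
      have hk' : k < t.length := by omega
      by_cases hpa : p a = true
      · rw [hpa]
        simp only [if_true]
        constructor
        · intro h
          exfalso
          have hpos : 0 < t.countP p := List.countP_pos_iff.mpr ⟨t[k], List.getElem_mem hk', hp⟩
          omega
        · intro h
          have hh := h 0 (by simp only [List.length_cons]; omega) (by omega)
          simp only [List.getElem_cons_zero] at hh
          rw [hpa] at hh; exact absurd hh (by simp)
      · rw [Bool.not_eq_true] at hpa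
        rw [hpa]
        simp only [Bool.false_eq_true, if_false, Nat.add_zero]
        rw [ih k hk' hp]
        constructor
        · intro h m hm hmk
          match m with
          | 0 => simp only [List.getElem_cons_zero]; exact hpa
          | m + 1 =>
            simp only [List.length_cons] at hm
            simp only [List.getElem_cons_succ]
            exact h m (by omega) (by omega)
        · intro h m hm hmk
          have hh := h (m + 1) (by simp only [List.length_cons]; omega) (by omega)
          simp only [List.getElem_cons_succ] at hh
          exact hh


-- the degree predicates of the two programs agree position by position
lemma gyoPredDeg (sets : List (List Int)) (hset : ∀ e ∈ sets, e.Nodup)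
    (alive : List Nat) (hnd : alive.Nodup)
    (hb : ∀ a ∈ alive, a < sets.length) (k : Nat) (hk : k < alive.length) :
    (gyoG sets alive[k]).all (fun v => (gyoDeg (alive.map (gyoG sets))).getD v 0 == 1)
      = gyoAllDis (gyoDisMat sets) alive alive[k] := by
  have hklt : alive[k] < sets.length := hb _ (List.getElem_mem hk)
  have hhnd : ∀ e ∈ alive.map (gyoG sets), e.Nodup := by
    intro e he
    rcases List.mem_map.mp he with ⟨a, _, rfl⟩
    exact gyoG_nodup sets hset a
  have hkh : k < (alive.map (gyoG sets)).length := by simpa using hk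
  rw [Bool.eq_iff_iff, List.all_eq_true, gyoAllDis_iff sets alive hb _ hklt]
  have hcnt : ∀ v : Int, v ∈ gyoG sets alive[k] →
      (((gyoDeg (alive.map (gyoG sets))).getD v 0 == 1) = true ↔
        ∀ m, (_ : m < alive.length) → m ≠ k → v ∉ gyoG sets alive[m]) := by
    intro v hv
    rw [gyoDeg_getD _ hhnd v, beq_iff_eq]
    have hcast : ((((alive.map (gyoG sets)).countP (fun e => decide (v ∈ e))) : Int) = 1
        ↔ (alive.map (gyoG sets)).countP (fun e => decide (v ∈ e)) = 1) := by
      exact_mod_cast Iff.rfl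
    rw [hcast]
    rw [countP_one_iff _ _ k hkh (by simp only [List.getElem_map]; simpa using hv)]
    constructor
    · intro h m hm hmk
      have := h m (by simpa using hm) hmk
      simp only [List.getElem_map] at this
      simpa using this
    · intro h m hm hmk
      rw [List.length_map] at hm
      simp only [List.getElem_map]
      simpa using h m hm hmk
  constructor
  · intro h b hbm
    rcases List.mem_iff_getElem.mp hbm with ⟨m, hm, rfl⟩
    by_cases hmk : m = k
    · subst hmk; exact Or.inl rfl
    · refine Or.inr ((PySem.Set.isdisjoint_iff _ _).mpr ?_)
      intro x hx
      exact (hcnt x hx).mp (h x hx) m hm hmk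
  · intro h v hv
    rw [hcnt v hv]
    intro m hm hmk
    rcases h alive[m] (List.getElem_mem hm) with h1 | h2
    · exact absurd (hnd.getElem_inj_iff.mp h1) hmk
    · exact (PySem.Set.isdisjoint_iff _ _).mp h2 v hv

lemma gyoOuter_corr (sets : List (List Int)) (alive : List Nat) (hnd : alive.Nodup)
    (hb : ∀ a ∈ alive, a < sets.length) :
    ∀ (suf pre : List Nat), alive = pre ++ suf →
      gyoOuter (alive.map (gyoG sets)) (suf.map (gyoG sets)) pre.length
        = (suf.find? (gyoAnySup (gyoSupMat sets) alive)).map (gyoG sets) := by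
  intro suf
  induction suf with
  | nil => intro pre heq; simp [gyoOuter]
  | cons a suf ih =>
    intro pre heq
    have hk : pre.length < alive.length := by rw [heq]; simp
    have hget : alive[pre.length] = a := by
      subst heq
      rw [List.getElem_append_right (Nat.le_refl _)]
      simp
    have hbridge := gyoPredSup sets alive hnd hb pre.length hk
    rw [hget] at hbridge
    simp only [List.map_cons, gyoOuter, hbridge]
    by_cases hp : gyoAnySup (gyoSupMat sets) alive a = true
    · rw [if_pos hp, List.find?_cons_of_pos hp, Option.map_some]
    · rw [if_neg hp, List.find?_cons_of_neg (by simpa using hp)]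
      have := ih (pre ++ [a]) (by rw [heq]; simp)
      simpa using this

lemma gyoDegScan_corr (sets : List (List Int)) (hset : ∀ e ∈ sets, e.Nodup)
    (alive : List Nat) (hnd : alive.Nodup) (hb : ∀ a ∈ alive, a < sets.length) :
    ∀ (suf pre : List Nat), alive = pre ++ suf →
      gyoDegScan (gyoDeg (alive.map (gyoG sets))) (suf.map (gyoG sets))
        = (suf.find? (gyoAllDis (gyoDisMat sets) alive)).map (gyoG sets) := by
  intro suf
  induction suf with
  | nil => intro pre heq; simp [gyoDegScan]
  | cons a suf ih =>
    intro pre heq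
    have hk : pre.length < alive.length := by rw [heq]; simp
    have hget : alive[pre.length] = a := by
      subst heq
      rw [List.getElem_append_right (Nat.le_refl _)]
      simp
    have hbridge := gyoPredDeg sets hset alive hnd hb pre.length hk
    rw [hget] at hbridge
    simp only [List.map_cons, gyoDegScan, hbridge]
    by_cases hp : gyoAllDis (gyoDisMat sets) alive a = true
    · rw [if_pos hp, List.find?_cons_of_pos hp, Option.map_some]
    · rw [if_neg hp, List.find?_cons_of_neg (by simpa using hp)]
      exact ih (pre ++ [a]) (by rw [heq]; simp)

lemma gyoRemove_eraseIdx :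
    ∀ (l : List (List Int)) (e : List Int) (k : Nat) (hk : k < l.length),
      PySem.Set.equal l[k] e = true →
      (∀ m, (_ : m < l.length) → m < k → PySem.Set.equal l[m] e = false) →
      gyoRemove l e = l.eraseIdx k := by
  intro l
  induction l with
  | nil => intro e k hk; simp at hk
  | cons x t ih =>
    intro e k hk hek hne
    match k with
    | 0 =>
      simp only [List.getElem_cons_zero] at hek
      simp [gyoRemove, hek]
    | k + 1 =>
      have hx : PySem.Set.equal x e = false := by
        have := hne 0 (by simp) (by omega)
        simpa using this
      simp only [gyoRemove, hx, Bool.false_eq_true, if_false, List.eraseIdx_cons_succ]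
      congr 1
      refine ih e k (by simpa using hk) (by simpa using hek) ?_
      intro m hm hmk
      have := hne (m + 1) (by simp only [List.length_cons]; omega) (by omega)
      simpa using this

lemma gyoRemove_corr (sets : List (List Int)) (alive : List Nat) (hnd : alive.Nodup)
    (k : Nat) (hk : k < alive.length)
    (hne : ∀ m, (_ : m < alive.length) → m < k →
      PySem.Set.equal (gyoG sets alive[m]) (gyoG sets alive[k]) = false) :
    gyoRemove (alive.map (gyoG sets)) (gyoG sets alive[k])
      = (alive.erase alive[k]).map (gyoG sets) := by
  rw [gyoRemove_eraseIdx (alive.map (gyoG sets)) _ k (by simpa using hk)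
      (by rw [List.getElem_map]; exact (PySem.Set.equal_iff _ _).mpr (fun _ => Iff.rfl))
      (by
        intro m hm hmk
        rw [List.getElem_map]
        exact hne m (by simpa using hm) hmk)]
  rw [List.Nodup.erase_getElem hnd k hk]
  exact List.eraseIdx_map _ _ _


-- one-step equations for the two loops
lemma gyoLoop_step_sub (h : List (List Int)) (e : List Int)
    (hne : h.isEmpty = false) (ho : gyoOuter h h 0 = some e) :
    gyoLoop h = gyoLoop (gyoRemove h e) := by
  rw [gyoLoop, hne]
  simp only [Bool.false_eq_true, if_false]
  split
  · next e1 heq => rw [ho] at heq; cases heq; rfl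
  · next heq => rw [ho] at heq; cases heq

lemma gyoLoop_step_deg (h : List (List Int)) (e : List Int)
    (hne : h.isEmpty = false) (ho : gyoOuter h h 0 = none)
    (hd : gyoDegScan (gyoDeg h) h = some e) :
    gyoLoop h = gyoLoop (gyoRemove h e) := by
  rw [gyoLoop, hne]
  simp only [Bool.false_eq_true, if_false]
  split
  · next e1 heq => rw [ho] at heq; cases heq
  · next heq =>
    split
    · next e2 heq2 => rw [hd] at heq2; cases heq2; rfl
    · next heq2 => rw [hd] at heq2; cases heq2

lemma gyoLoop_step_false (h : List (List Int))
    (hne : h.isEmpty = false) (ho : gyoOuter h h 0 = none)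
    (hd : gyoDegScan (gyoDeg h) h = none) :
    gyoLoop h = false := by
  rw [gyoLoop, hne]
  simp only [Bool.false_eq_true, if_false]
  split
  · next e1 heq => rw [ho] at heq; cases heq
  · next heq =>
    split
    · next e2 heq2 => rw [hd] at heq2; cases heq2
    · next heq2 => rfl

lemma gyoLoopB_step_some (sup dis : List (List Bool)) (alive : List Nat) (i : Nat)
    (hne : alive.isEmpty = false) (hp : gyoPick sup dis alive = some i) :
    gyoLoopB sup dis alive = gyoLoopB sup dis (alive.erase i) := by
  rw [gyoLoopB, hne]
  simp only [Bool.false_eq_true, if_false]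
  split
  · next i' heq => rw [hp] at heq; cases heq; rfl
  · next heq => rw [hp] at heq; cases heq

lemma gyoLoopB_step_none (sup dis : List (List Bool)) (alive : List Nat)
    (hne : alive.isEmpty = false) (hp : gyoPick sup dis alive = none) :
    gyoLoopB sup dis alive = false := by
  rw [gyoLoopB, hne]
  simp only [Bool.false_eq_true, if_false]
  split
  · next i' heq => rw [hp] at heq; cases heq
  · next heq => rfl

lemma gyoLoop_corr (sets : List (List Int)) (hset : ∀ e ∈ sets, e.Nodup) :
    ∀ (N : Nat) (alive : List Nat), alive.length ≤ N → alive.Nodup →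
      (∀ a ∈ alive, a < sets.length) →
      gyoLoop (alive.map (gyoG sets)) = gyoLoopB (gyoSupMat sets) (gyoDisMat sets) alive := by
  intro N
  induction N with
  | zero =>
    intro alive hlen _ _
    have : alive = [] := List.eq_nil_of_length_eq_zero (by omega)
    subst this
    rw [gyoLoop, gyoLoopB]
    simp
  | succ N ih =>
    intro alive hlen hnd hb
    by_cases halive : alive = []
    · subst halive
      rw [gyoLoop, gyoLoopB]
      simp
    · have h1 : (alive.map (gyoG sets)).isEmpty = false := by
        simp [List.isEmpty_eq_false_iff, halive]
      have h2 : alive.isEmpty = false := by simp [List.isEmpty_eq_false_iff, halive]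
      have hout := gyoOuter_corr sets alive hnd hb alive [] rfl
      simp only [List.length_nil] at hout
      have hdeg := gyoDegScan_corr sets hset alive hnd hb alive [] rfl
      have hstep : ∀ a : Nat, a ∈ alive →
          (∀ k, (hk : k < alive.length) → alive[k] = a →
            (∀ m, (_ : m < alive.length) → m < k →
              PySem.Set.equal (gyoG sets alive[m]) (gyoG sets alive[k]) = false)) →
          gyoLoop (gyoRemove (alive.map (gyoG sets)) (gyoG sets a))
            = gyoLoopB (gyoSupMat sets) (gyoDisMat sets) (alive.erase a) := by
        intro a hamem hmin
        rcases List.mem_iff_getElem.mp hamem with ⟨k, hk, hak⟩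
        -- a might occur several times? no: nodup gives the found index is THE index
        have hrm : gyoRemove (alive.map (gyoG sets)) (gyoG sets a)
            = (alive.erase a).map (gyoG sets) := by
          subst hak
          exact gyoRemove_corr sets alive hnd k hk (hmin k hk rfl)
        rw [hrm]
        have herase : (alive.erase a).length = alive.length - 1 := List.length_erase_of_mem hamem
        have hpos : 0 < alive.length := List.length_pos_of_mem hamem
        exact ih (alive.erase a) (by omega) (hnd.erase a)
          (fun b hbm => hb b (List.mem_of_mem_erase hbm))
      cases hf : alive.find? (gyoAnySup (gyoSupMat sets) alive) with
      | some a =>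
        rw [hf, Option.map_some] at hout
        have hpick : gyoPick (gyoSupMat sets) (gyoDisMat sets) alive = some a := by
          unfold gyoPick; rw [hf]
        rw [gyoLoop_step_sub _ _ h1 hout, gyoLoopB_step_some _ _ _ _ h2 hpick]
        obtain ⟨hpa, k0, hk0, hak0, hmin0⟩ := List.find?_eq_some_iff_getElem.mp hf
        apply hstep a (hak0 ▸ List.getElem_mem hk0)
        intro k hk hak m hm hmk
        have hkk0 : k = k0 := hnd.getElem_inj_iff.mp (by rw [hak, hak0])
        subst hkk0
        by_contra hcon
        rw [Bool.not_eq_false] at hcon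
        have heqm := (PySem.Set.equal_iff _ _).mp hcon
        have hsupm : gyoAnySup (gyoSupMat sets) alive alive[m] = true := by
          rw [gyoAnySup_iff sets alive hb _ (hb _ (List.getElem_mem hm))]
          refine ⟨alive[k], List.getElem_mem hk, ?_, ?_⟩
          · intro heq
            exact absurd (hnd.getElem_inj_iff.mp heq) (by omega)
          · rw [PySem.Set.issuperset_iff]
            intro x hx
            exact (heqm x).mpr hx
        have := hmin0 m hmk
        rw [hsupm] at this
        simp at this
      | none =>
        rw [hf, Option.map_none] at hout
        cases hf2 : alive.find? (gyoAllDis (gyoDisMat sets) alive) with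
        | some a =>
          rw [hf2, Option.map_some] at hdeg
          have hpick : gyoPick (gyoSupMat sets) (gyoDisMat sets) alive = some a := by
            unfold gyoPick; rw [hf, hf2]
          rw [gyoLoop_step_deg _ _ h1 hout hdeg, gyoLoopB_step_some _ _ _ _ h2 hpick]
          obtain ⟨hpa, k0, hk0, hak0, hmin0⟩ := List.find?_eq_some_iff_getElem.mp hf2
          apply hstep a (hak0 ▸ List.getElem_mem hk0)
          intro k hk hak m hm hmk
          have hkk0 : k = k0 := hnd.getElem_inj_iff.mp (by rw [hak, hak0])
          subst hkk0
          by_contra hcon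
          rw [Bool.not_eq_false] at hcon
          have heqm := (PySem.Set.equal_iff _ _).mp hcon
          have hpak := (gyoAllDis_iff sets alive hb _ (hb _ (List.getElem_mem hk))).mp
            (by rw [hak]; exact hpa)
          have hdm : gyoAllDis (gyoDisMat sets) alive alive[m] = true := by
            rw [gyoAllDis_iff sets alive hb _ (hb _ (List.getElem_mem hm))]
            intro b hbm
            by_cases hbm2 : b = alive[m]
            · exact Or.inl hbm2
            · refine Or.inr ((PySem.Set.isdisjoint_iff _ _).mpr ?_)
              intro x hx
              have hxk : x ∈ gyoG sets alive[k] := (heqm x).mp hx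
              rcases hpak b hbm with hbk | hdisj
              · subst hbk
                have hmk' : alive[m] ≠ alive[k] := by
                  intro heq
                  exact absurd (hnd.getElem_inj_iff.mp heq) (by omega)
                rcases hpak alive[m] (List.getElem_mem hm) with h3 | h4
                · exact absurd h3 hmk'
                · exact fun hxb => (PySem.Set.isdisjoint_iff _ _).mp h4 x hxb hx
              · exact (PySem.Set.isdisjoint_iff _ _).mp hdisj x hxk
          have := hmin0 m hmk
          rw [hdm] at this
          simp at this
        | none =>
          rw [hf2, Option.map_none] at hdeg
          have hpick : gyoPick (gyoSupMat sets) (gyoDisMat sets) alive = none := by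
            unfold gyoPick; rw [hf, hf2]
          rw [gyoLoop_step_false _ h1 hout hdeg, gyoLoopB_step_none _ _ _ h2 hpick]

-- ===== VERDICT (by name: the statement is the Claim_ definition above) =====
theorem gyo_acyclicity_spec : Claim_equal_gyo_acyclicity := by
  intro hyperedges _
  unfold Spec_gyo_acyclicity gyo_acyclicity gyo_acyclicity_alt
  have hset : ∀ e ∈ hyperedges.map PySem.Set.ofList, e.Nodup := by
    intro e he
    rcases List.mem_map.mp he with ⟨x, _, rfl⟩
    exact PySem.Set.nodup_ofList x
  have hrange : hyperedges.map PySem.Set.ofList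
      = (List.range (hyperedges.map PySem.Set.ofList).length).map
          (gyoG (hyperedges.map PySem.Set.ofList)) := by
    apply List.ext_getElem (by simp)
    intro i h1 h2
    simp only [List.getElem_map, List.getElem_range, gyoG]
    rw [List.getD_eq_getElem _ _ h1]
    simp
  calc gyoLoop (hyperedges.map PySem.Set.ofList)
      = gyoLoop ((List.range (hyperedges.map PySem.Set.ofList).length).map
          (gyoG (hyperedges.map PySem.Set.ofList))) := by rw [← hrange]
    _ = gyoLoopB (gyoSupMat (hyperedges.map PySem.Set.ofList))
          (gyoDisMat (hyperedges.map PySem.Set.ofList))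
          (List.range (hyperedges.map PySem.Set.ofList).length) := by
        apply gyoLoop_corr _ hset (hyperedges.map PySem.Set.ofList).length
        · simp
        · exact List.nodup_range
        · intro a ha
          simpa using List.mem_range.mp ha
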